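-- pv_equiv track=rewrite | github.com/augustincourtier/canines | src/prepare_moves.py | generate_index_array
-- ===== SOURCE A (Python) =====
-- def generate_index_array(box_number, group_size):
--     """This function generates an array containing box_number arrays of group_size elements
--     each element is and index in range 0 -- box_number*group_size -1"""
--     index = 0
--     result = []
--     # for each box generated for one group in main
--     for i in range(0, box_number):
--         subarray = []
--         # for all possibilities of splitting (from 0 to number of our elements in the initial square)
--         for j in range(0, group_size + 1):
--             subarray += [index]
--             index += 1
--         result += [subarray]
--
--     # Ex: 3 possible boxes generated for a group of 5 werewolves
--     # returns [[0, 1, 2, 3, 4, 5], [6, 7, 8, 9, 10, 11], [12, 13, 14, 15, 16, 17]]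
--     return result
-- ===== SOURCE B (Python) =====
-- def generate_index_array(box_number, group_size):
--     """Build the flat index sequence once as a range, then reshape it into
--     box_number consecutive rows of width group_size + 1 by slicing."""
--     n = group_size + 1
--     flat = range(box_number * n)
--     return [list(flat[i * n:(i + 1) * n]) for i in range(box_number)]
-- ===== Notes on version B (the rewrite author's own statement) =====
-- stated objective: simpler
-- what changed: Replaces A's element-by-element incrementing counter with nested append loops by building the whole flat index range once and reshaping it into rows by slicing.
import Mathlib
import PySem

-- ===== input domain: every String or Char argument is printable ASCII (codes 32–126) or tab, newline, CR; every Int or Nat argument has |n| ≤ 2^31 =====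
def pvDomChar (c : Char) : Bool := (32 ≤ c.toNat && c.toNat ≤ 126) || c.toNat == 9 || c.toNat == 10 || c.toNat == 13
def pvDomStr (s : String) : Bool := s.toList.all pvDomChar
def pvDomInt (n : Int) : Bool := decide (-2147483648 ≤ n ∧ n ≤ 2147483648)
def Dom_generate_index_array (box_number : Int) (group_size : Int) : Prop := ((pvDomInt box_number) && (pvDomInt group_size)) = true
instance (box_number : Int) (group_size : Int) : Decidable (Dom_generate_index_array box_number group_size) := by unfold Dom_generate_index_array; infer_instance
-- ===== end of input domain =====

-- B builds the flat index range once and reshapes it into rows by slicing,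
-- instead of A's element-by-element counter with nested appends (objective: simpler).

-- ===== PORT A =====
def generate_index_array (box_number : Int) (group_size : Int) : List (List Int) :=
  -- index = 0; result = []; for i in range(0, box_number): subarray = [];
  --   for j in range(0, group_size+1): subarray += [index]; index += 1
  --   result += [subarray]
  let st := (PySem.List.pyRange 0 box_number 1).foldl
    (fun (st : Int × List (List Int)) _ =>
      let inner := (PySem.List.pyRange 0 (group_size + 1) 1).foldl
        (fun (s : Int × List Int) _ => (s.1 + 1, s.2 ++ [s.1])) (st.1, [])
      (inner.1, st.2 ++ [inner.2]))
    (0, [])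
  st.2

-- ===== PORT B =====
-- n = group_size + 1; flat = range(box_number * n);
-- [list(flat[i*n:(i+1)*n]) for i in range(box_number)]
-- Python's lazy range-slice flat[a:b] IS the range with clamped bounds
-- (CPython range.__getitem__ with step 1), so each row is ported exactly as
-- pyRange (clampIdx len a) (clampIdx len b) 1, len = len(flat).
def generate_index_array_alt (box_number : Int) (group_size : Int) : List (List Int) :=
  let n := group_size + 1
  let flatLen := (box_number * n).toNat  -- = len(range(box_number * n))
  (PySem.List.pyRange 0 box_number 1).map
    (fun i => PySem.List.pyRange (PySem.List.clampIdx flatLen (i * n))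
      (PySem.List.clampIdx flatLen ((i + 1) * n)) 1)

-- ===== PRECONDITION & SPEC =====
def Spec_generate_index_array (box_number : Int) (group_size : Int) (out : List (List Int)) : Prop := out = generate_index_array_alt box_number group_size
instance (box_number : Int) (group_size : Int) (out : List (List Int)) : Decidable (Spec_generate_index_array box_number group_size out) := by unfold Spec_generate_index_array; infer_instance

-- ===== CLAIM (what is proved, stated in full; the proofs are below) =====
def Claim_equal_generate_index_array : Prop := ∀ (box_number : Int) (group_size : Int), Dom_generate_index_array box_number group_size → Spec_generate_index_array box_number group_size (generate_index_array box_number group_size)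

-- ===== LEMMAS AND PROOFS =====

-- A's inner loop appends L.length consecutive integers starting at idx.
theorem inner_loop_eq (L : List Int) (idx : Int) (acc : List Int) :
    L.foldl (fun (s : Int × List Int) _ => (s.1 + 1, s.2 ++ [s.1])) (idx, acc)
      = (idx + L.length, acc ++ PySem.List.pyRange idx (idx + L.length) 1) := by
  induction L generalizing idx acc with
  | nil =>
    simp only [List.foldl_nil, List.length_nil, Nat.cast_zero, add_zero]
    rw [PySem.List.pyRange_one_eq_nil (le_refl idx)]
    simp
  | cons x xs ih =>
    simp only [List.foldl_cons, List.length_cons]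
    rw [ih, Prod.mk.injEq]
    constructor
    · push_cast; ring
    · have he : idx + (((xs.length : Int)) + 1) = idx + 1 + (xs.length : Int) := by ring
      rw [Nat.cast_add, Nat.cast_one, he,
        PySem.List.pyRange_one_cons (by omega : idx < idx + 1 + (xs.length : Int))]
      simp [List.append_assoc]

-- A's outer loop, fully characterised: rows are consecutive chunks of width m.
theorem outer_loop_eq (L : List Int) (m : Nat) (g : Int)
    (hm : (PySem.List.pyRange 0 (g + 1) 1).length = m)
    (idx : Int) (acc : List (List Int)) :
    L.foldl
      (fun (st : Int × List (List Int)) _ =>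
        let inner := (PySem.List.pyRange 0 (g + 1) 1).foldl
          (fun (s : Int × List Int) _ => (s.1 + 1, s.2 ++ [s.1])) (st.1, [])
        (inner.1, st.2 ++ [inner.2]))
      (idx, acc)
      = (idx + L.length * m,
         acc ++ (List.range L.length).map
           (fun (r : Nat) => PySem.List.pyRange (idx + (r : Int) * (m : Int)) (idx + (r : Int) * (m : Int) + (m : Int)) 1)) := by
  induction L generalizing idx acc with
  | nil => simp
  | cons x xs ih =>
    simp only [List.foldl_cons, List.length_cons]
    rw [inner_loop_eq, hm, ih, Prod.mk.injEq]
    constructor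
    · push_cast; ring
    · rw [List.range_succ_eq_map]
      simp only [List.map_cons, List.map_map, List.append_assoc, List.cons_append,
        Nat.cast_zero, zero_mul, add_zero, List.nil_append]
      congr 1
      congr 1
      apply List.map_congr_left
      intro r _
      simp only [Function.comp_apply]
      congr 1 <;> push_cast <;> ring

-- drop over a unit-step range shifts its lower end
theorem drop_pyRange (j : Nat) (a b : Int) :
    (PySem.List.pyRange a b 1).drop j = PySem.List.pyRange (a + j) b 1 := by
  induction j generalizing a with
  | zero => simp
  | succ j ih =>
    by_cases hab : a < b
    · rw [PySem.List.pyRange_one_cons hab]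
      have h : a + ((j + 1 : Nat) : Int) = (a + 1) + (j : Nat) := by push_cast; ring
      rw [h, List.drop_succ_cons, ih]
    · rw [PySem.List.pyRange_one_eq_nil (by omega), List.drop_nil,
        PySem.List.pyRange_one_eq_nil (by omega)]

-- a slice of range(T) is the range over the clamped bounds (what Python's lazy
-- range slicing computes)
theorem slice_pyRange (T a b : Int) :
    PySem.List.slice (PySem.List.pyRange 0 T 1) (some a) (some b)
      = PySem.List.pyRange (PySem.List.clampIdx T.toNat a)
          (PySem.List.clampIdx T.toNat b) 1 := by
  have hlen : (PySem.List.pyRange 0 T 1).length = T.toNat := by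
    rw [PySem.List.length_pyRange_one]; omega
  simp only [PySem.List.slice, hlen]
  set s := PySem.List.clampIdx T.toNat a with hs
  set e := PySem.List.clampIdx T.toNat b with he
  have hsT : s ≤ T.toNat := PySem.List.clampIdx_le _ _
  have heT : e ≤ T.toNat := PySem.List.clampIdx_le _ _
  rw [drop_pyRange, zero_add]
  by_cases hse : e ≤ s
  · rw [Nat.sub_eq_zero_of_le hse, List.take_zero,
      PySem.List.pyRange_one_eq_nil (by exact_mod_cast hse)]
  · have hse' : s < e := by omega
    have heT' : (e : Int) ≤ T := by omega
    rw [PySem.List.pyRange_one_append (s : Int) (e : Int) T (by exact_mod_cast le_of_lt hse') heT']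
    have hlen2 : (PySem.List.pyRange (s : Int) (e : Int) 1).length = e - s := by
      rw [PySem.List.length_pyRange_one]; omega
    rw [List.take_left' hlen2]

theorem slice_nil {α : Type} (a b : Int) :
    PySem.List.slice ([] : List α) (some a) (some b) = [] := by
  simp [PySem.List.slice]

-- one row of B equals the corresponding chunk, when the width n is positive
theorem row_eq (b n : Int) (hn : 0 < n) (k : Nat) (hk : (k : Int) + 1 ≤ b) :
    PySem.List.slice (PySem.List.pyRange 0 (b * n) 1) (some ((k : Int) * n)) (some (((k : Int) + 1) * n))
      = PySem.List.pyRange ((k : Int) * n) ((k : Int) * n + n) 1 := by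
  set m := n.toNat with hm
  have hnm : (m : Int) = n := Int.toNat_of_nonneg (le_of_lt hn)
  have h1 : (0 : Int) ≤ (k : Int) * n := mul_nonneg (by positivity) (le_of_lt hn)
  have h2 : (k : Int) * n + n ≤ b * n := by
    have h := mul_le_mul_of_nonneg_right hk (le_of_lt hn)
    nlinarith
  have hsplit : PySem.List.pyRange 0 (b * n) 1
      = (PySem.List.pyRange 0 ((k : Int) * n) 1 ++ PySem.List.pyRange ((k : Int) * n) ((k : Int) * n + n) 1)
        ++ PySem.List.pyRange ((k : Int) * n + n) (b * n) 1 := by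
    rw [List.append_assoc]
    rw [← PySem.List.pyRange_one_append ((k : Int) * n) ((k : Int) * n + n) (b * n) (by linarith) h2]
    exact PySem.List.pyRange_one_append 0 ((k : Int) * n) (b * n) h1 (by linarith)
  have hcast1 : (k : Int) * n = ((k * m : Nat) : Int) := by push_cast [hnm]; ring
  have hcast2 : ((k : Int) + 1) * n = (((k * m + m : Nat)) : Int) := by push_cast [hnm]; ring
  rw [hsplit, hcast1, hcast2, PySem.List.slice_natCast, Nat.add_sub_cancel_left,
    List.append_assoc]
  have hlen1 : (PySem.List.pyRange 0 (((k * m : Nat) : Int)) 1).length = k * m := by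
    rw [PySem.List.length_pyRange_one]; omega
  have hlen2 : (PySem.List.pyRange (((k * m : Nat) : Int)) (((k * m : Nat) : Int) + n) 1).length = m := by
    rw [PySem.List.length_pyRange_one]; omega
  rw [List.drop_left' hlen1, List.take_left' hlen2]

-- ===== VERDICT (by name: the statement is the Claim_ definition above) =====
theorem generate_index_array_spec : Claim_equal_generate_index_array := by
  intro b g _
  unfold Spec_generate_index_array generate_index_array generate_index_array_alt
  set n := g + 1 with hn
  set m := n.toNat with hm
  have hmlen : (PySem.List.pyRange 0 (g + 1) 1).length = m := by
    rw [PySem.List.length_pyRange_one]; omega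
  rw [outer_loop_eq (PySem.List.pyRange 0 b 1) m g hmlen 0 []]
  simp only [List.nil_append, zero_add]
  have hL : (PySem.List.pyRange 0 b 1).length = (b - 0).toNat :=
    PySem.List.length_pyRange_one 0 b
  rw [hL]
  conv_rhs => rw [PySem.List.pyRange_one 0 b, List.map_map]
  apply List.map_congr_left
  intro k hk
  have hkb : (k : Int) < b := by
    have := List.mem_range.mp hk; omega
  simp only [Function.comp, zero_add]
  rw [← slice_pyRange (b * n) ((k : Int) * n) (((k : Int) + 1) * n)]
  by_cases hpos : 0 < n
  · have hnm : (m : Int) = n := by omega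
    rw [hnm, row_eq b n hpos k (by omega)]
  · have hm0 : m = 0 := by omega
    have hbn : b * n ≤ 0 := by
      have hb : 0 < b := by omega
      exact mul_nonpos_of_nonneg_of_nonpos (le_of_lt hb) (by omega)
    rw [PySem.List.pyRange_one_eq_nil hbn, slice_nil, hm0]
    simp only [Nat.cast_zero, mul_zero, add_zero]
    rw [PySem.List.pyRange_one_eq_nil (le_refl _)]
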